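-- pv_equiv track=rewrite | github.com/eunnbi/algorithm | stack/programmers/기능 개발/main.py | solution
-- ===== SOURCE A (Python) =====
-- import math
--
-- def solution(progresses, speeds):
--     answer = []
--     list = [math.ceil((100 - progresses[i]) / speeds[i]) for i in range(len(progresses))]
--     stack = []
--     for num in list:
--         if (stack and stack[-1] >= num):
--             stack.append(stack[-1])
--             if (answer):
--                 answer[-1] += 1
--             else:
--                 answer.append(1)
--         else:
--             stack.append(num)
--             answer.append(1)
--     return answer
-- ===== SOURCE B (Python) =====
-- import math
--
-- def solution(progresses, speeds):
--     days = [math.ceil((100 - p) / s) for p, s in zip(progresses, speeds)]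
--
--     def groups(ds):
--         if not ds:
--             return []
--         k = 1
--         while k < len(ds) and ds[k] <= ds[0]:
--             k += 1
--         return [k] + groups(ds[k:])
--
--     return groups(days)
-- ===== Notes on version B (the rewrite author's own statement) =====
-- stated objective: alternative
-- what changed: Replaces A's single stateful stack loop (running-max stack plus mutating the last answer entry) by recursive group extraction: each group is found by scanning forward from its leader for the first strictly later day, emitting the group size and recursing on the remaining slice; no stack, no running maximum, no in-place counter.
import Mathlib
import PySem

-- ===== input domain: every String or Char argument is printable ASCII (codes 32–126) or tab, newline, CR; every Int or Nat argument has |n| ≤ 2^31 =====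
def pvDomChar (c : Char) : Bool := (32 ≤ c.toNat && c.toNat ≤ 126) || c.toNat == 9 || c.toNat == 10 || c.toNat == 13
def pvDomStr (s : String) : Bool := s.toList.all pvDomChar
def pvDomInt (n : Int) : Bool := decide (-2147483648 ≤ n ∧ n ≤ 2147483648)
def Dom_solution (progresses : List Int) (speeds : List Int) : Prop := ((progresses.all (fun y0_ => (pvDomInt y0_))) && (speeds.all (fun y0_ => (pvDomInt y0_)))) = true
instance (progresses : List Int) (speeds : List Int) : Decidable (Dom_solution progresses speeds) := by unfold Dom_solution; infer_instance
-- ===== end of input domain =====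

-- B replaces A's stateful stack loop by recursive group extraction (scan forward from each leader, recurse on the rest) — alternative decomposition, same cost.

-- ===== PORT A =====
-- math.ceil((100-p)/s): on Dom (|values| ≤ 2^31) the float quotient is close enough that
-- math.ceil equals the exact rational ceiling, which is -((-a) // s); ported exactly so.
def pvCeilDiv (a b : Int) : Int := -(PySem.Int.floordiv (-a) b)

-- the loop body of A: state is (stack, answer), Python order, append = ++ [·]
def pvStepA (st : List Int × List Int) (num : Int) : List Int × List Int :=
  match st.1.getLast? with
  | some top =>
      if top ≥ num then
        (st.1 ++ [top],
         match st.2.getLast? with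
         | some a => st.2.dropLast ++ [a + 1]
         | none => st.2 ++ [1])
      else (st.1 ++ [num], st.2 ++ [1])
  | none => (st.1 ++ [num], st.2 ++ [1])

def solution (progresses : List Int) (speeds : List Int) : List Int :=
  let list := (PySem.List.pyRange 0 progresses.length 1).map (fun i =>
    pvCeilDiv (100 - PySem.List.pyGetD progresses i 0) (PySem.List.pyGetD speeds i 0))
  (list.foldl pvStepA ([], [])).2

-- ===== PORT B =====
-- the inner while loop of groups: k counts the leading elements of rest that are ≤ ds[0]
def pvLeCount (d : Int) : List Int → Nat
  | [] => 0
  | x :: xs => if x ≤ d then pvLeCount d xs + 1 else 0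

-- groups(ds): emit the size k of the leading group, recurse on ds[k:]
def pvGroups : List Int → List Int
  | [] => []
  | d :: rest =>
      ((pvLeCount d rest + 1 : Nat) : Int) :: pvGroups (rest.drop (pvLeCount d rest))
termination_by ds => ds.length
decreasing_by simp

def solution_alt (progresses : List Int) (speeds : List Int) : List Int :=
  let days := (progresses.zip speeds).map (fun ps => pvCeilDiv (100 - ps.1) ps.2)
  pvGroups days

-- ===== PRECONDITION & SPEC =====
-- A indexes speeds[i] for every i < len(progresses) and divides by it, so Pre_ requires
-- speeds to cover progresses and those entries to be nonzero (else A raises).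
def Pre_solution (progresses : List Int) (speeds : List Int) : Prop :=
  progresses.length ≤ speeds.length ∧ ∀ s ∈ speeds.take progresses.length, s ≠ 0
instance (progresses : List Int) (speeds : List Int) : Decidable (Pre_solution progresses speeds) := by unfold Pre_solution; infer_instance

def pvWitness_solution : List Int × List Int := ([93, 30, 55], [1, 30, 5])

def Spec_solution (progresses : List Int) (speeds : List Int) (out : List Int) : Prop := out = solution_alt progresses speeds
instance (progresses : List Int) (speeds : List Int) (out : List Int) : Decidable (Spec_solution progresses speeds out) := by unfold Spec_solution; infer_instance

-- ===== CLAIM (what is proved, stated in full; the proofs are below) =====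
def Claim_equal_solution : Prop := ∀ (progresses : List Int) (speeds : List Int), Dom_solution progresses speeds → Pre_solution progresses speeds → Spec_solution progresses speeds (solution progresses speeds)

-- ===== LEMMAS AND PROOFS =====

-- A's day list equals B's zip-based day list under Pre_
theorem pv_days_eq (progresses speeds : List Int)
    (h : progresses.length ≤ speeds.length) :
    (PySem.List.pyRange 0 progresses.length 1).map (fun i =>
      pvCeilDiv (100 - PySem.List.pyGetD progresses i 0) (PySem.List.pyGetD speeds i 0))
    = (progresses.zip speeds).map (fun ps => pvCeilDiv (100 - ps.1) ps.2) := by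
  apply List.ext_getElem
  · simp [PySem.List.length_pyRange_one]; omega
  · intro k h1 h2
    have hk : k < progresses.length := by
      simpa [PySem.List.length_pyRange_one] using h1
    have := PySem.List.getElem?_map_pyRange_zero (fun i =>
      pvCeilDiv (100 - PySem.List.pyGetD progresses i 0) (PySem.List.pyGetD speeds i 0))
      progresses.length k (by exact_mod_cast hk)
    have hL : (List.map (fun i =>
      pvCeilDiv (100 - PySem.List.pyGetD progresses i 0) (PySem.List.pyGetD speeds i 0))
      (PySem.List.pyRange 0 progresses.length 1))[k]? = some
      (pvCeilDiv (100 - PySem.List.pyGetD progresses k 0) (PySem.List.pyGetD speeds k 0)) := this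
    have hgp : PySem.List.pyGetD progresses (k : Int) 0 = progresses[k] := by
      simp [PySem.List.pyGetD_natCast, List.getD_eq_getElem?_getD, List.getElem?_eq_getElem hk]
    have hgs : PySem.List.pyGetD speeds (k : Int) 0 = speeds[k] := by
      have : k < speeds.length := by omega
      simp [PySem.List.pyGetD_natCast, List.getD_eq_getElem?_getD, List.getElem?_eq_getElem this]
    rw [List.getElem?_eq_getElem h1] at hL
    simp only [Option.some.injEq] at hL
    rw [hL, hgp, hgs]
    simp [List.getElem_zip]

-- A-side counting: the run lengths produced by A's branch condition (top ≥ num)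
def pvGoA (cur c : Int) : List Int → List Int
  | [] => [c]
  | n :: ns => if cur ≥ n then pvGoA cur (c + 1) ns else c :: pvGoA n 1 ns

-- the fold over A's step computes pvGoA of the remaining days
theorem pv_fold_run (days : List Int) (stack ans : List Int) (cur c : Int)
    (hs : stack.getLast? = some cur) :
    (days.foldl pvStepA (stack, ans ++ [c])).2 = ans ++ pvGoA cur c days := by
  induction days generalizing stack ans cur c with
  | nil => simp [pvGoA]
  | cons n ns ih =>
    simp only [List.foldl_cons, pvStepA, hs, pvGoA]
    by_cases hge : cur ≥ n
    · simp only [hge, if_pos, List.getLast?_concat, List.dropLast_concat]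
      rw [ih (stack ++ [cur]) ans cur (c + 1) (by simp)]
    · simp only [hge, if_neg, not_false_iff]
      have : ans ++ [c] ++ [1] = (ans ++ [c]) ++ [1] := rfl
      rw [this, ih (stack ++ [n]) (ans ++ [c]) n 1 (by simp)]
      simp

theorem pvGroups_nil : pvGroups [] = [] := by simp [pvGroups.eq_def]

theorem pvGroups_cons (d : Int) (rest : List Int) :
    pvGroups (d :: rest)
      = ((pvLeCount d rest + 1 : Nat) : Int) :: pvGroups (rest.drop (pvLeCount d rest)) := by
  rw [pvGroups.eq_def]

-- A's ≥-based run counting equals B's leader-scan grouping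
theorem pv_goA_groups (days : List Int) (cur c : Int) :
    pvGoA cur c days
      = (c + (pvLeCount cur days : Int)) :: pvGroups (days.drop (pvLeCount cur days)) := by
  induction days generalizing cur c with
  | nil => simp [pvGoA, pvLeCount, pvGroups_nil]
  | cons n ns ih =>
    simp only [pvGoA, pvLeCount]
    by_cases hge : cur ≥ n
    · have hle : n ≤ cur := hge
      rw [if_pos hge, if_pos hle, ih cur (c + 1)]
      congr 1
      · push_cast; ring
    · have hle : ¬ n ≤ cur := hge
      rw [if_neg hge, if_neg hle, ih n 1]
      simp only [List.drop_zero, Int.natCast_zero, add_zero, pvGroups_cons, List.cons.injEq]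
      refine ⟨trivial, by push_cast; ring, trivial⟩

theorem solution_spec : Claim_equal_solution := by
  intro progresses speeds _ hpre
  unfold Spec_solution solution solution_alt
  rw [pv_days_eq progresses speeds hpre.1]
  cases hd : (progresses.zip speeds).map (fun ps => pvCeilDiv (100 - ps.1) ps.2) with
  | nil => simp [pvGroups_nil]
  | cons d ds =>
    have hstep : pvStepA ([], []) d = ([d], [] ++ [1]) := by simp [pvStepA]
    simp only [List.foldl_cons, hstep]
    rw [pv_fold_run ds [d] [] d 1 (by simp), pv_goA_groups, pvGroups_cons]
    simp only [List.nil_append, List.cons.injEq]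
    exact ⟨by push_cast; ring, trivial⟩
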